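-- pv_equiv track=rewrite | github.com/fabrizionastri/price_conversion | core/utils/show_differences.py | _get_diff_blocks
-- ===== SOURCE A (Python) =====
-- def _get_diff_blocks(opcodes):
--     # Identify blocks of differences considering proximity
--     diff_blocks = []
--     current_block = None
--
--     for tag, i1, i2, j1, j2 in opcodes:
--         if tag == 'equal':
--             if current_block is not None:
--                 length = i2 - i1
--                 if length < 5:
--                     # Include equal block in current_block
--                     current_block['a_end'] = i2
--                     current_block['b_end'] = j2
--                 else:
--                     # Close current_block
--                     diff_blocks.append(current_block)
--                     current_block = None
--             else:
--                 pass
--         else: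
--             # tag is 'replace', 'delete', 'insert'
--             if current_block is None:
--                 # Start new current_block
--                 current_block = {'a_start': i1, 'a_end': i2, 'b_start': j1, 'b_end': j2}
--             else:
--                 # Extend current_block
--                 current_block['a_end'] = i2
--                 current_block['b_end'] = j2
--
--     # After processing all opcodes, check for unfinished block
--     if current_block is not None:
--         diff_blocks.append(current_block)
--
--     return diff_blocks
-- ===== SOURCE B (Python) =====
-- def _get_diff_blocks(opcodes):
--     # Split opcodes into segments at long 'equal' separators, then map segments to blocks.
--     segments = []
--     cur = []
--     for op in opcodes:
--         if op[0] == 'equal' and op[2] - op[1] >= 5: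
--             segments.append(cur)
--             cur = []
--         else:
--             cur.append(op)
--     segments.append(cur)
--
--     blocks = []
--     for seg in segments:
--         first = next((op for op in seg if op[0] != 'equal'), None)
--         if first is None:
--             continue
--         last = seg[-1]
--         blocks.append({'a_start': first[1], 'a_end': last[2],
--                        'b_start': first[3], 'b_end': last[4]})
--     return blocks
-- ===== Notes on version B (the rewrite author's own statement) =====
-- stated objective: alternative
-- what changed: Replaces A's single pass with a carried mutable current-block dict by a split-then-map pipeline: cut the opcode list into segments at long 'equal' separators, then turn each segment containing a non-equal opcode into a block from its first non-equal opcode and its last opcode.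
import Mathlib
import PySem

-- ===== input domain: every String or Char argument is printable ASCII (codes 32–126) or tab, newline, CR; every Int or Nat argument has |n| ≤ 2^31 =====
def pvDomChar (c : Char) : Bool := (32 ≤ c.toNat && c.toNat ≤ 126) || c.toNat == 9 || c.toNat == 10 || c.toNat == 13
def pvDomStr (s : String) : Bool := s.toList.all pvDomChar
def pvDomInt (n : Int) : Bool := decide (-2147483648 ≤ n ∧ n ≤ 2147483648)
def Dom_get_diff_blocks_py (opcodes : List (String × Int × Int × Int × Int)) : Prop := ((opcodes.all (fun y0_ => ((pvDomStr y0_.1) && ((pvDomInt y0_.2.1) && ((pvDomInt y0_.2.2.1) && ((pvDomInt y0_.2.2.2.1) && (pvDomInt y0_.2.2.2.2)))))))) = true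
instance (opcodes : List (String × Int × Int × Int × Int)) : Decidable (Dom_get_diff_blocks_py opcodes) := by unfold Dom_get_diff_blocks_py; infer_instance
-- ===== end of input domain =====

-- B replaces A's carried current-block state by a split-into-segments-then-map pipeline (objective: alternative decomposition, same cost).

-- ===== PORT A =====
-- A's current_block is a dict with the fixed keys a_start/a_end/b_start/b_end inserted in that
-- order and only ever overwritten in place; it is carried as the quadruple
-- (a_start, a_end, b_start, b_end) and rendered to the association list when appended.
def pvRenderBlock (cb : Int × Int × Int × Int) : List (String × Int) :=
  [("a_start", cb.1), ("a_end", cb.2.1), ("b_start", cb.2.2.1), ("b_end", cb.2.2.2)]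

def pvStepA (st : List (List (String × Int)) × Option (Int × Int × Int × Int))
    (op : String × Int × Int × Int × Int) :
    List (List (String × Int)) × Option (Int × Int × Int × Int) :=
  let (tag, i1, i2, j1, j2) := op
  let (diffBlocks, cur) := st
  if tag == "equal" then
    match cur with
    | some cb =>
      if i2 - i1 < 5 then
        (diffBlocks, some (cb.1, i2, cb.2.2.1, j2))
      else
        (diffBlocks ++ [pvRenderBlock cb], none)
    | none => (diffBlocks, none)
  else
    match cur with
    | none => (diffBlocks, some (i1, i2, j1, j2))
    | some cb => (diffBlocks, some (cb.1, i2, cb.2.2.1, j2))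

def get_diff_blocks_py (opcodes : List (String × Int × Int × Int × Int)) : List (List (String × Int)) :=
  let (diffBlocks, cur) := opcodes.foldl pvStepA ([], none)
  match cur with
  | some cb => diffBlocks ++ [pvRenderBlock cb]
  | none => diffBlocks

-- ===== PORT B =====
def pvStepB (st : List (List (String × Int × Int × Int × Int)) × List (String × Int × Int × Int × Int))
    (op : String × Int × Int × Int × Int) :
    List (List (String × Int × Int × Int × Int)) × List (String × Int × Int × Int × Int) :=
  if op.1 == "equal" && decide (op.2.2.1 - op.2.1 ≥ 5) then
    (st.1 ++ [st.2], [])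
  else
    (st.1, st.2 ++ [op])

def pvSegBlock (seg : List (String × Int × Int × Int × Int)) : Option (List (String × Int)) :=
  match seg.find? (fun op => !(op.1 == "equal")) with
  | none => none
  | some first =>
    match seg.getLast? with
    | none => none
    | some last =>
      some [("a_start", first.2.1), ("a_end", last.2.2.1),
            ("b_start", first.2.2.2.1), ("b_end", last.2.2.2.2)]

def get_diff_blocks_py_alt (opcodes : List (String × Int × Int × Int × Int)) : List (List (String × Int)) :=
  let (segs, cur) := opcodes.foldl pvStepB ([], [])
  (segs ++ [cur]).filterMap pvSegBlock

-- ===== PRECONDITION & SPEC =====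
def Spec_get_diff_blocks_py (opcodes : List (String × Int × Int × Int × Int)) (out : List (List (String × Int))) : Prop := out = get_diff_blocks_py_alt opcodes
instance (opcodes : List (String × Int × Int × Int × Int)) (out : List (List (String × Int))) : Decidable (Spec_get_diff_blocks_py opcodes out) := by unfold Spec_get_diff_blocks_py; infer_instance

-- ===== CLAIM (what is proved, stated in full; the proofs are below) =====
def Claim_equal_get_diff_blocks_py : Prop := ∀ (opcodes : List (String × Int × Int × Int × Int)), Dom_get_diff_blocks_py opcodes → Spec_get_diff_blocks_py opcodes (get_diff_blocks_py opcodes)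

-- ===== LEMMAS AND PROOFS =====

-- Relation between A's optional current block and B's current segment.
def pvRel (cur : Option (Int × Int × Int × Int)) (seg : List (String × Int × Int × Int × Int)) : Prop :=
  match cur with
  | none => seg.find? (fun op => !(op.1 == "equal")) = none
  | some cb =>
    ∃ first last, seg.find? (fun op => !(op.1 == "equal")) = some first ∧
      seg.getLast? = some last ∧
      cb = (first.2.1, last.2.2.1, first.2.2.2.1, last.2.2.2.2)

theorem pvRel_pvSegBlock {cur seg} (h : pvRel cur seg) :
    (pvSegBlock seg) = cur.map pvRenderBlock := by
  match cur with
  | none => simp only [pvRel] at h; simp [pvSegBlock, h]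
  | some cb =>
    obtain ⟨first, last, hf, hl, hcb⟩ := h
    simp [pvSegBlock, hf, hl, hcb, pvRenderBlock]

theorem pvMain (opcodes : List (String × Int × Int × Int × Int))
    (blocksA : List (List (String × Int))) (cur : Option (Int × Int × Int × Int))
    (segs : List (List (String × Int × Int × Int × Int))) (seg : List (String × Int × Int × Int × Int))
    (hB : blocksA = segs.filterMap pvSegBlock) (hR : pvRel cur seg) :
    (match (opcodes.foldl pvStepA (blocksA, cur)) with
     | (bs, some cb) => bs ++ [pvRenderBlock cb]
     | (bs, none) => bs)
    = (match (opcodes.foldl pvStepB (segs, seg)) with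
       | (ss, c) => (ss ++ [c]).filterMap pvSegBlock) := by
  induction opcodes generalizing blocksA cur segs seg with
  | nil =>
    simp only [List.foldl_nil]
    have := pvRel_pvSegBlock hR
    match cur with
    | none => simp_all
    | some cb => simp_all
  | cons op rest ih =>
    obtain ⟨tag, i1, i2, j1, j2⟩ := op
    simp only [List.foldl_cons]
    by_cases heq : tag == "equal"
    · by_cases hlen : i2 - i1 < 5
      · -- short equal: B appends to segment; A extends (if open) or ignores
        have hstepB : pvStepB (segs, seg) (tag, i1, i2, j1, j2) = (segs, seg ++ [(tag, i1, i2, j1, j2)]) := by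
          simp [pvStepB]; omega
        match cur with
        | none =>
          have hstepA : pvStepA (blocksA, none) (tag, i1, i2, j1, j2) = (blocksA, none) := by
            simp [pvStepA, heq]
          rw [hstepA, hstepB]
          apply ih _ _ _ _ hB
          simp only [pvRel] at hR ⊢
          rw [List.find?_append, hR]
          simp [heq]
        | some cb =>
          have hstepA : pvStepA (blocksA, some cb) (tag, i1, i2, j1, j2)
              = (blocksA, some (cb.1, i2, cb.2.2.1, j2)) := by
            simp [pvStepA, heq, hlen]
          rw [hstepA, hstepB]
          apply ih _ _ _ _ hB
          obtain ⟨first, last, hf, hl, hcb⟩ := hR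
          refine ⟨first, (tag, i1, i2, j1, j2), ?_, ?_, ?_⟩
          · rw [List.find?_append, hf]; rfl
          · simp
          · simp [hcb]
      · -- long equal: separator
        have hstepB : pvStepB (segs, seg) (tag, i1, i2, j1, j2) = (segs ++ [seg], []) := by
          simp [pvStepB, heq]; omega
        match cur with
        | none =>
          have hstepA : pvStepA (blocksA, none) (tag, i1, i2, j1, j2) = (blocksA, none) := by
            simp [pvStepA, heq]
          rw [hstepA, hstepB]
          apply ih
          · rw [hB, List.filterMap_append]
            have := pvRel_pvSegBlock hR
            simp_all
          · simp [pvRel]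
        | some cb =>
          have hstepA : pvStepA (blocksA, some cb) (tag, i1, i2, j1, j2)
              = (blocksA ++ [pvRenderBlock cb], none) := by
            simp [pvStepA, heq, hlen]
          rw [hstepA, hstepB]
          apply ih
          · rw [hB, List.filterMap_append]
            have := pvRel_pvSegBlock hR
            simp_all
          · simp [pvRel]
    · -- non-equal opcode
      have hstepB : pvStepB (segs, seg) (tag, i1, i2, j1, j2) = (segs, seg ++ [(tag, i1, i2, j1, j2)]) := by
        simp [pvStepB, heq]
      match cur with
      | none =>
        have hstepA : pvStepA (blocksA, none) (tag, i1, i2, j1, j2)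
            = (blocksA, some (i1, i2, j1, j2)) := by
          simp [pvStepA, heq]
        rw [hstepA, hstepB]
        apply ih _ _ _ _ hB
        simp only [pvRel] at hR ⊢
        refine ⟨(tag, i1, i2, j1, j2), (tag, i1, i2, j1, j2), ?_, ?_, rfl⟩
        · rw [List.find?_append, hR]; simp [heq]
        · simp
      | some cb =>
        have hstepA : pvStepA (blocksA, some cb) (tag, i1, i2, j1, j2)
            = (blocksA, some (cb.1, i2, cb.2.2.1, j2)) := by
          simp [pvStepA, heq]
        rw [hstepA, hstepB]
        apply ih _ _ _ _ hB
        obtain ⟨first, last, hf, hl, hcb⟩ := hR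
        refine ⟨first, (tag, i1, i2, j1, j2), ?_, ?_, ?_⟩
        · rw [List.find?_append, hf]; rfl
        · simp
        · simp [hcb]

-- ===== VERDICT (by name: the statement is the Claim_ definition above) =====
theorem get_diff_blocks_py_spec : Claim_equal_get_diff_blocks_py := by
  intro opcodes _
  unfold Spec_get_diff_blocks_py get_diff_blocks_py get_diff_blocks_py_alt
  have h := pvMain opcodes [] none [] [] (by simp) (by simp [pvRel])
  rcases hA : List.foldl pvStepA ([], none) opcodes with ⟨bs, cur⟩
  rcases hB : List.foldl pvStepB ([], []) opcodes with ⟨ss, c⟩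
  rw [hA, hB] at h
  cases cur <;> simpa using h
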